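-- pv_equiv track=rewrite | github.com/oscarcaranqui/ejemploaplicativodeaire | v1/_generic/methods.py | transform_to_little_endian
-- ===== SOURCE A (Python) =====
-- from typing import List
--
-- def transform_to_little_endian(response_big_endian: List[int]) -> List[int]:
--     response_little_endian = []
--     for i in range(0, len(response_big_endian), 4):
--         if i + 3 >= len(response_big_endian):
--             break
--
--         response_little_endian.append(response_big_endian[i + 3])
--         response_little_endian.append(response_big_endian[i + 2])
--         response_little_endian.append(response_big_endian[i + 1])
--         response_little_endian.append(response_big_endian[i])
--
--     if len(response_big_endian) % 4 != 0:
--         add = [0] * (4 - (len(response_big_endian) % 4))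
--         tmp = response_big_endian[int(len(response_big_endian) / 4) * 4:] + add
--
--         response_little_endian.append(tmp[3])
--         response_little_endian.append(tmp[2])
--         response_little_endian.append(tmp[1])
--         response_little_endian.append(tmp[0])
--
--     return response_little_endian
-- ===== SOURCE B (Python) =====
-- from typing import List
--
-- def transform_to_little_endian(response_big_endian: List[int]) -> List[int]:
--     # Closed-form index permutation: output position j reads input position
--     # 4*(j//4) + 3 - j%4, or 0 when that position is past the end (zero padding).
--     n = len(response_big_endian)
--     m = (n + 3) // 4 * 4
--     return [response_big_endian[4 * (j // 4) + 3 - j % 4]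
--             if 4 * (j // 4) + 3 - j % 4 < n else 0
--             for j in range(m)]
-- ===== Notes on version B (the rewrite author's own statement) =====
-- stated objective: alternative
-- what changed: B replaces A's chunk-walking loop plus separate padded-tail branch by a closed-form index permutation: it builds the output as a single comprehension over output positions j, reading input position 4*(j//4)+3-j%4 and emitting 0 when that position is past the end.
import Mathlib
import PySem

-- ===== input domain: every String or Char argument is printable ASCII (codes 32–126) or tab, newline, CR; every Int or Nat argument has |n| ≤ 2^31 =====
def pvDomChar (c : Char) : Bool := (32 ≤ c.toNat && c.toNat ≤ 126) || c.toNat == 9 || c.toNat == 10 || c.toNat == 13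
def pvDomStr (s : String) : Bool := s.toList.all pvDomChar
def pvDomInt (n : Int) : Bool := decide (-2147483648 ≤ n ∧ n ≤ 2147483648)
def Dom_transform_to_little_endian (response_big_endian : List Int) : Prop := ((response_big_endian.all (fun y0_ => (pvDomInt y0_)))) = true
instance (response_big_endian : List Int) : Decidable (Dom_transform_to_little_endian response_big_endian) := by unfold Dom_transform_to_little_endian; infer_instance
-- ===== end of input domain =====

-- B replaces A's chunk loop + separate padded-tail branch by a closed-form index
-- permutation over output positions (objective: alternative, same cost).


-- ===== PORT A =====
-- the 'for i in range(0, len, 4)' loop with its early 'break' when i + 3 >= len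
def tleLoopA (xs : List Int) (i : Nat) (acc : List Int) : List Int :=
  if i < xs.length then
    if xs.length ≤ i + 3 then acc
    else
      tleLoopA xs (i + 4)
        (acc ++ [PySem.List.pyGetD xs ((i : Int) + 3) 0, PySem.List.pyGetD xs ((i : Int) + 2) 0,
                 PySem.List.pyGetD xs ((i : Int) + 1) 0, PySem.List.pyGetD xs (i : Int) 0])
  else acc
termination_by xs.length - i

def transform_to_little_endian (response_big_endian : List Int) : List Int :=
  let response_little_endian := tleLoopA response_big_endian 0 []
  if response_big_endian.length % 4 ≠ 0 then
    -- int(len/4)*4: float division of a Python list length by 4 is exact here, so int(len/4) = len // 4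
    let add : List Int := List.replicate (4 - response_big_endian.length % 4) 0
    let tmp := PySem.List.slice response_big_endian
      (some ((response_big_endian.length / 4 * 4 : Nat) : Int)) none ++ add
    response_little_endian ++
      [PySem.List.pyGetD tmp 3 0, PySem.List.pyGetD tmp 2 0,
       PySem.List.pyGetD tmp 1 0, PySem.List.pyGetD tmp 0 0]
  else response_little_endian

-- ===== PORT B =====
-- one comprehension over output positions j in range(m), m = (n+3)//4*4:
-- emit xs[4*(j//4)+3-j%4] when that source index is in range, else 0
def tleIdx (xs : List Int) (j : Nat) : Int :=
  if 4 * (j / 4) + 3 - j % 4 < xs.length then xs.getD (4 * (j / 4) + 3 - j % 4) 0 else 0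

def transform_to_little_endian_alt (response_big_endian : List Int) : List Int :=
  (List.range ((response_big_endian.length + 3) / 4 * 4)).map (tleIdx response_big_endian)

-- ===== PRECONDITION & SPEC =====
def Spec_transform_to_little_endian (response_big_endian : List Int) (out : List Int) : Prop := out = transform_to_little_endian_alt response_big_endian
instance (response_big_endian : List Int) (out : List Int) : Decidable (Spec_transform_to_little_endian response_big_endian out) := by unfold Spec_transform_to_little_endian; infer_instance

-- ===== CLAIM (what is proved, stated in full; the proofs are below) =====
def Claim_equal_transform_to_little_endian : Prop := ∀ (response_big_endian : List Int), Dom_transform_to_little_endian response_big_endian → Spec_transform_to_little_endian response_big_endian (transform_to_little_endian response_big_endian)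

-- ===== LEMMAS AND PROOFS =====

-- A's tail branch, named for the proof
def tleTmpA (xs : List Int) : List Int :=
  PySem.List.slice xs (some ((xs.length / 4 * 4 : Nat) : Int)) none
    ++ List.replicate (4 - xs.length % 4) 0

def tleTailA (xs : List Int) : List Int :=
  [PySem.List.pyGetD (tleTmpA xs) 3 0, PySem.List.pyGetD (tleTmpA xs) 2 0,
   PySem.List.pyGetD (tleTmpA xs) 1 0, PySem.List.pyGetD (tleTmpA xs) 0 0]

theorem range'_split4 (i r : Nat) :
    List.range' i (4 + r) = List.range' i 4 ++ List.range' (i + 4) r := by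
  have h := List.range'_append (s := i) (step := 1) (m := 4) (n := r)
  simpa [Nat.add_comm] using h.symm

theorem getD_drop (xs : List Int) (i k : Nat) :
    (xs.drop i).getD k 0 = xs.getD (i + k) 0 := by
  simp [List.getD, List.getElem?_drop]

theorem range'_map4 (f : Nat → Int) (i : Nat) :
    (List.range' i 4).map f = [f i, f (i+1), f (i+2), f (i+3)] := by
  simp [List.range']

theorem tleIdx_at (xs : List Int) (i t k : Nat) (h4 : i % 4 = 0) (ht : t < 4)
    (hk : i + 3 = k + t) :
    tleIdx xs (i + t) = if k < xs.length then xs.getD k 0 else 0 := by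
  unfold tleIdx
  have h1 : 4 * ((i + t) / 4) + 3 - (i + t) % 4 = k := by omega
  rw [h1]

theorem tle_key (xs : List Int) : ∀ n' i acc, xs.length - i = n' → i % 4 = 0 → i ≤ xs.length →
    (if xs.length % 4 ≠ 0 then tleLoopA xs i acc ++ tleTailA xs else tleLoopA xs i acc)
    = acc ++ (List.range' i ((xs.length + 3) / 4 * 4 - i)).map (tleIdx xs) := by
  intro n'
  induction n' using Nat.strong_induction_on with
  | _ n' ih =>
    intro i acc hn h4 hle
    by_cases hfull : i + 3 < xs.length
    · -- a complete group: A's loop takes one step; B's range splits off four indices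
      have hi : i < xs.length := by omega
      have hm4 : i + 4 ≤ (xs.length + 3) / 4 * 4 := by omega
      have hsplit : (xs.length + 3) / 4 * 4 - i = 4 + ((xs.length + 3) / 4 * 4 - (i + 4)) := by omega
      rw [hsplit, range'_split4, List.map_append, range'_map4]
      have e0 := tleIdx_at xs i 0 (i + 3) h4 (by omega) (by omega)
      have e1 := tleIdx_at xs i 1 (i + 2) h4 (by omega) (by omega)
      have e2 := tleIdx_at xs i 2 (i + 1) h4 (by omega) (by omega)
      have e3 := tleIdx_at xs i 3 i h4 (by omega) (by omega)
      simp only [Nat.add_zero] at e0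
      rw [e0, e1, e2, e3]
      simp only [if_pos (by omega : i + 3 < xs.length), if_pos (by omega : i + 2 < xs.length),
        if_pos (by omega : i + 1 < xs.length), if_pos hi]
      have hg : ∀ k : Nat, PySem.List.pyGetD xs ((i : Int) + k) 0 = xs.getD (i + k) 0 := by
        intro k
        have : ((i : Int) + k) = ((i + k : Nat) : Int) := by push_cast; ring
        rw [this, PySem.List.pyGetD_natCast]
      have hstep : (if xs.length ≤ i + 3 then acc else
          tleLoopA xs (i + 4)
            (acc ++ [PySem.List.pyGetD xs ((i : Int) + 3) 0, PySem.List.pyGetD xs ((i : Int) + 2) 0,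
                     PySem.List.pyGetD xs ((i : Int) + 1) 0, PySem.List.pyGetD xs (i : Int) 0])) =
          tleLoopA xs (i + 4)
            (acc ++ [xs.getD (i + 3) 0, xs.getD (i + 2) 0, xs.getD (i + 1) 0, xs.getD i 0]) := by
        rw [if_neg (by omega : ¬ xs.length ≤ i + 3)]
        have g3 := hg 3; have g2 := hg 2; have g1 := hg 1
        have g0 : PySem.List.pyGetD xs (i : Int) 0 = xs.getD i 0 := PySem.List.pyGetD_natCast xs i 0
        push_cast at g3 g2 g1
        rw [g3, g2, g1, g0]
      have hA : tleLoopA xs i acc = tleLoopA xs (i + 4)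
          (acc ++ [xs.getD (i + 3) 0, xs.getD (i + 2) 0, xs.getD (i + 1) 0, xs.getD i 0]) := by
        rw [tleLoopA.eq_def]; rw [if_pos hi]; exact hstep
      have hIH := ih (xs.length - (i + 4)) (by omega) (i + 4)
        (acc ++ [xs.getD (i + 3) 0, xs.getD (i + 2) 0, xs.getD (i + 1) 0, xs.getD i 0])
        rfl (by omega) (by omega)
      split_ifs with hmod
      · rw [hA]
        rw [if_pos hmod] at hIH
        rw [hIH]
        have hmap : i + 3 - 0 = i + 3 := by omega
        simp [List.append_assoc]
      · rw [hA]
        rw [if_neg hmod] at hIH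
        rw [hIH]
        simp [List.append_assoc]
    · by_cases hi : i < xs.length
      · -- partial tail group: A breaks and pads; B's four final indices, the out-of-range ones giving 0
        have hr1 : 0 < xs.length - i ∧ xs.length - i < 4 := by omega
        have hmod : xs.length % 4 = xs.length - i := by omega
        have hne : xs.length % 4 ≠ 0 := by omega
        have hm : (xs.length + 3) / 4 * 4 = i + 4 := by omega
        have hstop : tleLoopA xs i acc = acc := by
          rw [tleLoopA.eq_def, if_pos hi, if_pos (by omega : xs.length ≤ i + 3)]
        rw [if_pos hne, hstop, hm]
        have hrw : i + 4 - i = 4 := by omega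
        rw [hrw, range'_map4]
        -- compute the tail list
        unfold tleTailA tleTmpA
        have hstart : xs.length / 4 * 4 = i := by omega
        rw [hstart]
        have hfrom : PySem.List.slice xs (some ((i : Nat) : Int)) none = xs.drop i :=
          PySem.List.slice_from_natCast xs i
        rw [hfrom]
        set tmp := xs.drop i ++ List.replicate (4 - xs.length % 4) (0:Int) with htmp
        have htmplen : tmp.length = 4 := by rw [htmp]; simp; omega
        have hgd : ∀ k : Nat, PySem.List.pyGetD tmp (k : Int) 0 = tmp.getD k 0 := fun k =>
          PySem.List.pyGetD_natCast tmp k 0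
        have g3 := hgd 3; have g2 := hgd 2; have g1 := hgd 1; have g0 := hgd 0
        push_cast at g3 g2 g1 g0
        rw [g3, g2, g1, g0]
        have htval : ∀ k : Nat, k < 4 →
            tmp.getD k 0 = if i + k < xs.length then xs.getD (i + k) 0 else 0 := by
          intro k hk
          rw [htmp]
          by_cases hkin : k < (xs.drop i).length
          · rw [List.getD_append _ _ _ _ hkin, getD_drop]
            rw [if_pos (by simp at hkin; omega)]
          · simp at hkin
            rw [if_neg (by omega)]
            have hle' : (xs.drop i).length ≤ k := by simp; omega
            simp only [List.getD, List.getElem?_append_right hle', List.getElem?_replicate,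
              List.length_drop]
            rw [if_pos (by omega)]
            rfl
        have v3 := htval 3 (by omega); have v2 := htval 2 (by omega)
        have v1 := htval 1 (by omega); have v0 := htval 0 (by omega)
        rw [v3, v2, v1, v0]
        have e0 := tleIdx_at xs i 0 (i + 3) h4 (by omega) (by omega)
        have e1 := tleIdx_at xs i 1 (i + 2) h4 (by omega) (by omega)
        have e2 := tleIdx_at xs i 2 (i + 1) h4 (by omega) (by omega)
        have e3 := tleIdx_at xs i 3 i h4 (by omega) (by omega)
        simp only [Nat.add_zero] at e0
        rw [e0, e1, e2, e3]
        simp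
      · -- i = xs.length: both are acc; length is a multiple of 4
        have hieq : i = xs.length := by omega
        have hmod : ¬ xs.length % 4 ≠ 0 := by omega
        have hm : (xs.length + 3) / 4 * 4 - i = 0 := by omega
        rw [if_neg hmod, tleLoopA.eq_def, if_neg hi, hm]
        simp

-- ===== VERDICT (by name: the statement is the Claim_ definition above) =====
theorem transform_to_little_endian_spec : Claim_equal_transform_to_little_endian := by
  intro xs _
  unfold Spec_transform_to_little_endian transform_to_little_endian transform_to_little_endian_alt
  have := tle_key xs xs.length 0 [] (by omega) (by omega) (Nat.zero_le _)
  rw [Nat.sub_zero, ← List.range_eq_range'] at this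
  simpa [tleTailA, tleTmpA] using this
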